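-- pv_equiv track=rewrite | github.com/asashepard/aspectcode | server/rules/test_no_assertions.py | _extract_ruby_block_body
-- ===== SOURCE A (Python) =====
-- from typing import List, Set, Dict, Iterable, Optional
--
-- def _extract_ruby_block_body(lines: List[str], start_line: int) -> List[str]:
--     """Extract Ruby block body (do...end or {...})."""
--     body = []
--     in_block = False
--
--     for i in range(start_line, min(start_line + 20, len(lines))):
--         line = lines[i]
--         if 'do' in line or '{' in line:
--             in_block = True
--         if in_block:
--             body.append(line)
--             if 'end' in line or '}' in line:
--                 break
--
--     return body
-- ===== SOURCE B (Python) =====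
-- def _extract_ruby_block_body(lines, start_line):
--     """Extract Ruby block body (do...end or {...})."""
--     end = min(start_line + 20, len(lines))
--     window = [lines[i] for i in range(start_line, end)]
--     opens = ['do' in l or '{' in l for l in window]
--     if True not in opens:
--         return []
--     o = opens.index(True)
--     closes = ['end' in l or '}' in l for l in window[o:]]
--     if True not in closes:
--         return window[o:]
--     return window[o:o + closes.index(True) + 1]
-- ===== Notes on version B (the rewrite author's own statement) =====
-- stated objective: simpler
-- what changed: Replaced A's single flag-driven loop (in_block boolean, append, break) by a loop-free formulation: materialize the 20-line window once, build boolean opener/closer masks with comprehensions, and obtain the body with .index and a single slice.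
-- outside the precondition, e.g. on _extract_ruby_block_body(['do end'], -5): A raises IndexError, B raises IndexError
import Mathlib
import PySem

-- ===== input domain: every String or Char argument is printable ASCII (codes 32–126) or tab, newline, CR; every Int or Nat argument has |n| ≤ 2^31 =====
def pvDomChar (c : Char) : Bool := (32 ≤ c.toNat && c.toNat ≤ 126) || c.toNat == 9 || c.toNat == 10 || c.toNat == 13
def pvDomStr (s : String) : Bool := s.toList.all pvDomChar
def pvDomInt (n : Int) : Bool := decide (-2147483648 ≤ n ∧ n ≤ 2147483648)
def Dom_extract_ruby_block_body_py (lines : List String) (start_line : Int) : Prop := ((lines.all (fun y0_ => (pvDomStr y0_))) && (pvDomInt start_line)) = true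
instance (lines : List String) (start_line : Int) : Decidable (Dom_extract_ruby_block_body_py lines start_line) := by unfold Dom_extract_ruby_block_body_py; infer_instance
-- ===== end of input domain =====

-- B replaces A's flag-driven break loop by boolean opener/closer masks, `.index` and one slice (simpler, loop-free formulation; same values).

-- ===== PORT A =====
-- 'do' in line or '{' in line
def pvOpens (line : String) : Bool := PySem.Str.isIn "do" line || PySem.Str.isIn "{" line
-- 'end' in line or '}' in line
def pvCloses (line : String) : Bool := PySem.Str.isIn "end" line || PySem.Str.isIn "}" line

-- A's for-loop over the index window; Python appends then returns body; `none` from pyGet? is Python's IndexError, excluded by Pre_.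
def pvGoA (lines : List String) (idxs : List Int) (in_block : Bool) : List String :=
  match idxs with
  | [] => []
  | i :: rest =>
    match PySem.List.pyGet? lines i with
    | none => []
    | some line =>
      let inb := in_block || pvOpens line
      if inb then
        if pvCloses line then [line] else line :: pvGoA lines rest true
      else pvGoA lines rest false

def extract_ruby_block_body_py (lines : List String) (start_line : Int) : List String :=
  pvGoA lines (PySem.List.pyRange start_line (min (start_line + 20) (lines.length : Int)) 1) false

-- ===== PORT B =====
-- the comprehension [lines[i] for i in range(...)]; `none` from pyGet? is Python's IndexError, excluded by Pre_
def pvWindow (lines : List String) (idxs : List Int) : List String :=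
  match idxs with
  | [] => []
  | i :: rest =>
    match PySem.List.pyGet? lines i with
    | none => []
    | some l => l :: pvWindow lines rest

-- Source B after the window is built: masks, `.index`, one slice (no scanning loop of its own)
def pvMaskSlice (window : List String) : List String :=
  let opens := window.map pvOpens
  match PySem.List.index? opens true with
  | none => []                                   -- True not in opens
  | some o =>
    let tail := PySem.List.slice window (some (o : Int)) none   -- window[o:]
    let closes := tail.map pvCloses
    match PySem.List.index? closes true with
    | none => tail                               -- True not in closes
    | some c => PySem.List.slice window (some (o : Int)) (some ((o + c + 1 : Nat) : Int))

def extract_ruby_block_body_py_alt (lines : List String) (start_line : Int) : List String :=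
  let wend := min (start_line + 20) (lines.length : Int)
  pvMaskSlice (pvWindow lines (PySem.List.pyRange start_line wend 1))

-- ===== PRECONDITION & SPEC =====
-- Pre_ excludes only inputs where Python A (and B alike) raises IndexError: start_line < -len(lines)
-- with a nonempty window makes lines[start_line] out of range.
def Pre_extract_ruby_block_body_py (lines : List String) (start_line : Int) : Prop :=
  -(lines.length : Int) ≤ start_line ∨ (lines.length : Int) ≤ start_line
instance (lines : List String) (start_line : Int) : Decidable (Pre_extract_ruby_block_body_py lines start_line) := by unfold Pre_extract_ruby_block_body_py; infer_instance

def pvWitness_extract_ruby_block_body_py : List String × Int := (["xs.each do |x|", "  puts x", "end"], 0)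

def Spec_extract_ruby_block_body_py (lines : List String) (start_line : Int) (out : List String) : Prop := out = extract_ruby_block_body_py_alt lines start_line
instance (lines : List String) (start_line : Int) (out : List String) : Decidable (Spec_extract_ruby_block_body_py lines start_line out) := by unfold Spec_extract_ruby_block_body_py; infer_instance

-- ===== CLAIM (what is proved, stated in full; the proofs are below) =====
def Claim_equal_extract_ruby_block_body_py : Prop := ∀ (lines : List String) (start_line : Int), Dom_extract_ruby_block_body_py lines start_line → Pre_extract_ruby_block_body_py lines start_line → Spec_extract_ruby_block_body_py lines start_line (extract_ruby_block_body_py lines start_line)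

-- ===== LEMMAS AND PROOFS =====

-- A's loop over the same window list (its value depends only on the lines actually read)
def pvGoW : List String → Bool → List String
  | [], _ => []
  | l :: rest, inb =>
    let inb' := inb || pvOpens l
    if inb' then
      if pvCloses l then [l] else l :: pvGoW rest true
    else pvGoW rest false

theorem pvGoA_eq_goW (lines : List String) (idxs : List Int) (b : Bool) :
    pvGoA lines idxs b = pvGoW (pvWindow lines idxs) b := by
  induction idxs generalizing b with
  | nil => rfl
  | cons i rest ih =>
    simp only [pvGoA, pvWindow]
    cases PySem.List.pyGet? lines i with
    | none => cases b <;> rfl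
    | some line => simp only [pvGoW, ih]

-- once the flag is set, A's loop takes lines up to and including the first closer
theorem pvGoW_true_eq (W : List String) :
    pvGoW W true = (match PySem.List.index? (W.map pvCloses) true with
                    | none => W
                    | some c => W.take (c + 1)) := by
  induction W with
  | nil => rfl
  | cons l rest ih =>
    simp only [pvGoW, List.map_cons, Bool.true_or, if_true]
    by_cases hc : pvCloses l = true
    · rw [hc, PySem.List.index?_cons_self]
      simp
    · rw [Bool.not_eq_true] at hc
      rw [hc, PySem.List.index?_cons_of_ne _ (by decide)]
      rw [ih]
      cases h : PySem.List.index? (rest.map pvCloses) true with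
      | none => rfl
      | some c => simp [List.take_succ_cons]

theorem pvMaskSlice_cons_not_open (l : String) (rest : List String) (h : pvOpens l = false) :
    pvMaskSlice (l :: rest) = pvMaskSlice rest := by
  simp only [pvMaskSlice, List.map_cons, h]
  rw [PySem.List.index?_cons_of_ne _ (by decide)]
  cases ho : PySem.List.index? (rest.map pvOpens) true with
  | none => simp
  | some o =>
    simp only [Option.map_some]
    rw [show ((o + 1 : Nat) : Int) = (((o + 1 : Nat)) : Int) by rfl]
    rw [PySem.List.slice_from_natCast, PySem.List.slice_from_natCast]
    simp only [List.drop_succ_cons]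
    cases hc : PySem.List.index? ((rest.drop o).map pvCloses) true with
    | none => rfl
    | some c =>
      dsimp only
      rw [PySem.List.slice_natCast, PySem.List.slice_natCast]
      simp only [List.drop_succ_cons]
      congr 1
      omega

theorem pvGoW_eq_maskSlice (W : List String) : pvGoW W false = pvMaskSlice W := by
  induction W with
  | nil => rfl
  | cons l rest ih =>
    by_cases ho : pvOpens l = true
    · simp only [pvGoW, ho, Bool.or_true, if_true]
      simp only [pvMaskSlice, List.map_cons, ho]
      rw [PySem.List.index?_cons_self]
      dsimp only
      rw [PySem.List.slice_from_natCast]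
      simp only [List.drop_zero, List.map_cons]
      by_cases hc : pvCloses l = true
      · rw [hc, PySem.List.index?_cons_self]
        dsimp only
        rw [PySem.List.slice_natCast]
        simp
      · rw [Bool.not_eq_true] at hc
        rw [hc, PySem.List.index?_cons_of_ne _ (by decide), pvGoW_true_eq]
        cases h : PySem.List.index? (rest.map pvCloses) true with
        | none => rfl
        | some c =>
          simp only [Option.map_some]
          rw [PySem.List.slice_natCast]
          simp only [List.drop_zero, Nat.sub_zero]
          rw [show 0 + (c + 1) + 1 = c + 1 + 1 by omega, List.take_succ_cons]
          simp
    · rw [Bool.not_eq_true] at ho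
      simp only [pvGoW, ho, Bool.or_false, Bool.false_eq_true, if_false]
      rw [ih, pvMaskSlice_cons_not_open l rest ho]

-- ===== VERDICT (by name: the statement is the Claim_ definition above) =====
theorem extract_ruby_block_body_py_spec : Claim_equal_extract_ruby_block_body_py := by
  intro lines start_line _ _
  unfold Spec_extract_ruby_block_body_py extract_ruby_block_body_py extract_ruby_block_body_py_alt
  rw [pvGoA_eq_goW, pvGoW_eq_maskSlice]
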